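-- pv_equiv track=rewrite | github.com/bandrow/scibot | release.py | getDOI
-- ===== SOURCE A (Python) =====
-- def getDOI(tags):
--     ids = set()
--     for t in tags:
--         if t.startswith('DOI:'):
--             ids.add(t)
--     if ids:
--         if len(ids) > 1:
--             raise ValueError('More than one DOI detected!')
--         return list(ids)[0]
-- ===== SOURCE B (Python) =====
-- def getDOI(tags):
--     doi = None
--     for t in tags:
--         if t.startswith('DOI:'):
--             if doi is not None and doi != t:
--                 raise ValueError('More than one DOI detected!')
--             doi = t
--     return doi
-- ===== Notes on version B (the rewrite author's own statement) =====
-- stated objective: simpler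
-- what changed: Keeps a single running scalar `doi` instead of accumulating a set and counting it afterwards; raises eagerly on the first conflicting DOI tag.
import Mathlib
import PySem

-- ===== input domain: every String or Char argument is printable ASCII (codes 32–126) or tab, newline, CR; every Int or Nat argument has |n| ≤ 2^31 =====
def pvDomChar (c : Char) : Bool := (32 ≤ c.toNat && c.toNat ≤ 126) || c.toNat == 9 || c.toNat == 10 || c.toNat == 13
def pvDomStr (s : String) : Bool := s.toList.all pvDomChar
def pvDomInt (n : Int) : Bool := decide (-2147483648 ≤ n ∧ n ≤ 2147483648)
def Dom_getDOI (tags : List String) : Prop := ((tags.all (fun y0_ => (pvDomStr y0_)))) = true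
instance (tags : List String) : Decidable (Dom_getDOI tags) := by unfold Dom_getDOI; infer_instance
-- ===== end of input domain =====

-- B replaces A's accumulated set + after-the-loop count by a single running scalar (simpler decomposition).
-- Both programs raise ValueError('More than one DOI detected!') on two distinct DOI: tags; Pre_ excludes exactly those inputs.

-- ===== PORT A =====
-- list(ids)[0] is only reached under Pre_ where the set has exactly one element, so set order is irrelevant.
def getDOI (tags : List String) : Option String :=
  let ids : PySem.Set String :=
    tags.foldl (fun s t => if PySem.Str.startswith t "DOI:" then PySem.Set.add s t else s)
      PySem.Set.empty
  if ids ≠ [] then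
    if PySem.Set.len ids > 1 then none  -- raise ValueError (excluded by Pre_)
    else ids[0]?
  else none

-- ===== PORT B =====
def getDOI_altGo (acc : Option String) : List String → Option String
  | [] => acc
  | t :: rest =>
    if PySem.Str.startswith t "DOI:" then
      match acc with
      | some d => if d ≠ t then none  -- raise ValueError (excluded by Pre_)
                  else getDOI_altGo (some t) rest
      | none => getDOI_altGo (some t) rest
    else getDOI_altGo acc rest

def getDOI_alt (tags : List String) : Option String :=
  getDOI_altGo none tags

-- ===== PRECONDITION & SPEC =====
-- Pre_ excludes exactly the inputs with two distinct 'DOI:'-prefixed tags, where the Python A raises ValueError.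
def Pre_getDOI (tags : List String) : Prop :=
  ∀ s ∈ tags, ∀ t ∈ tags,
    PySem.Str.startswith s "DOI:" = true → PySem.Str.startswith t "DOI:" = true → s = t
instance (tags : List String) : Decidable (Pre_getDOI tags) := by unfold Pre_getDOI; infer_instance
def pvWitness_getDOI : List String := ["x", "DOI:10.1", "DOI:10.1"]
def Spec_getDOI (tags : List String) (out : Option String) : Prop := out = getDOI_alt tags
instance (tags : List String) (out : Option String) : Decidable (Spec_getDOI tags out) := by unfold Spec_getDOI; infer_instance

-- ===== CLAIM (what is proved, stated in full; the proofs are below) =====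
def Claim_equal_getDOI : Prop := ∀ (tags : List String), Dom_getDOI tags → Pre_getDOI tags → Spec_getDOI tags (getDOI tags)

-- ===== LEMMAS AND PROOFS =====
-- A's fold over a one-element set stays put when every DOI tag in the rest equals d.
lemma foldA_singleton (tags : List String) (d : String)
    (h : ∀ t ∈ tags, PySem.Str.startswith t "DOI:" = true → t = d) :
    tags.foldl (fun s t => if PySem.Str.startswith t "DOI:" then PySem.Set.add s t else s) [d] = [d] := by
  induction tags with
  | nil => rfl
  | cons t rest ih =>
    simp only [List.foldl]
    by_cases hp : PySem.Str.startswith t "DOI:" = true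
    · have ht := h t (by simp) hp
      subst ht
      simp only [hp, if_true, PySem.Set.add, PySem.Set.contains]
      simp only [List.contains_cons, BEq.rfl, Bool.true_or, if_true]
      exact ih (fun u hu hpu => h u (by simp [hu]) hpu)
    · simp only [hp]
      exact ih (fun u hu hpu => h u (by simp [hu]) hpu)

-- B's loop with acc = some d returns d when every DOI tag in the rest equals d.
lemma goB_some (tags : List String) (d : String)
    (h : ∀ t ∈ tags, PySem.Str.startswith t "DOI:" = true → t = d) :
    getDOI_altGo (some d) tags = some d := by
  induction tags with
  | nil => rfl
  | cons t rest ih =>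
    simp only [getDOI_altGo]
    by_cases hp : PySem.Str.startswith t "DOI:" = true
    · have ht := h t (by simp) hp
      subst ht
      simp only [hp, if_true, ne_eq, not_true_eq_false, if_false]
      exact ih (fun u hu hpu => h u (by simp [hu]) hpu)
    · simp only [hp]
      exact ih (fun u hu hpu => h u (by simp [hu]) hpu)

-- Main invariant: starting from the empty state, under Pre_ either no DOI is seen
-- (A's set empty, B's acc none) or both end with the same single DOI.
lemma main_inv (tags : List String) (hpre : Pre_getDOI tags) :
    (tags.foldl (fun s t => if PySem.Str.startswith t "DOI:" then PySem.Set.add s t else s) [] = []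
      ∧ getDOI_altGo none tags = none)
    ∨ (∃ d, tags.foldl (fun s t => if PySem.Str.startswith t "DOI:" then PySem.Set.add s t else s) [] = [d]
      ∧ getDOI_altGo none tags = some d) := by
  induction tags with
  | nil => exact Or.inl ⟨rfl, rfl⟩
  | cons t rest ih =>
    have hrest : Pre_getDOI rest := fun s hs u hu => hpre s (by simp [hs]) u (by simp [hu])
    by_cases hp : PySem.Str.startswith t "DOI:" = true
    · right
      refine ⟨t, ?_, ?_⟩
      · simp only [List.foldl, hp, if_true, PySem.Set.add, PySem.Set.contains]
        simp only [List.contains_nil, List.nil_append]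
        exact foldA_singleton rest t
          (fun u hu hpu => hpre u (by simp [hu]) t (by simp) hpu hp)
      · simp only [getDOI_altGo, hp, if_true]
        exact goB_some rest t
          (fun u hu hpu => hpre u (by simp [hu]) t (by simp) hpu hp)
    · have := ih hrest
      simpa only [List.foldl, hp, if_false, getDOI_altGo] using this

-- ===== VERDICT (by name: the statement is the Claim_ definition above) =====
theorem getDOI_spec : Claim_equal_getDOI := by
  intro tags _ hpre
  unfold Spec_getDOI getDOI getDOI_alt
  rcases main_inv tags hpre with ⟨hA, hB⟩ | ⟨d, hA, hB⟩
  · simp only [PySem.Set.empty]; rw [hA, hB]; simp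
  · simp only [PySem.Set.empty]; rw [hA, hB]; simp [PySem.Set.len]
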